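-- pv_equiv track=rewrite | github.com/zanglab/CTCF_T-ALL_code | f10_TF_binding/f3_TALL_Notch/f4_ctcf_notch_pairwise_dis/find_overlap_keep_info_NOT_sep_strand_lastColMarked_Distance_keep_revised.py | get_overlap_info_strID
-- ===== SOURCE A (Python) =====
-- import re,bisect
--
-- def get_overlap_info_strID(islands,regions):
--     # for each island in islands[chrom], check if 1-overlap 0-non-overlap with regions[chrom]
--     # islands/regions represents for compare_regions/basic_region respectively
--     #island_dict = {}
--     #i=0
--     overlapped,nonoverlapped = {},{}
--     for chrom in islands:
--         if chrom not in regions: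
--             for island in islands[chrom]:
--                 if chrom not in nonoverlapped:
--                     nonoverlapped[chrom] = []
--                 nonoverlapped[chrom].append(island)
--         else:
--             # check the regions in regions[chrom] are non-overlap and sorted
--             regionlist = []
--             for region in regions[chrom]:
--                 regionlist.extend(region)
--             for num in range(len(regionlist)-1):
--                 assert regionlist[num]<regionlist[num+1]
--
--             # for each island, check if overlapped with regions[chrom]
--             for island in islands[chrom]:
--                 #ID = chrom+'_'+str(island[0])+'_'+str(island[1])+'_'+str(i)
--                 assert island[0]<=island[1]
--                 s = bisect.bisect_left(regionlist,island[0])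
--                 e = bisect.bisect_right(regionlist,island[1])
--                 if s==e and s%2==0:
--                     if chrom not in nonoverlapped:
--                         nonoverlapped[chrom] = []
--                     nonoverlapped[chrom].append(island)
--                 else:
--                     if chrom not in overlapped:
--                         overlapped[chrom] = []
--                     overlapped[chrom].append(island)
--
--     return overlapped,nonoverlapped
-- ===== SOURCE B (Python) =====
-- def get_overlap_info_strID(islands, regions):
--     # linear interval-walk classification: instead of binary search (bisect) into the
--     # flattened boundary list, count boundaries below/inside the island in one scan
--     overlapped, nonoverlapped = {}, {}
--     for chrom, isls in islands.items():
--         if chrom in regions: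
--             bounds = [x for region in regions[chrom] for x in region]
--             assert all(x < y for x, y in zip(bounds, bounds[1:]))
--             ov, nov = [], []
--             for island in isls:
--                 a, b = island[0], island[1]
--                 assert a <= b
--                 hit = any(a <= x <= b for x in bounds)
--                 before = sum(1 for x in bounds if x < a)
--                 (ov if hit or before % 2 == 1 else nov).append(island)
--             if ov:
--                 overlapped[chrom] = ov
--             if nov:
--                 nonoverlapped[chrom] = nov
--         elif isls:
--             nonoverlapped[chrom] = list(isls)
--     return overlapped, nonoverlapped
-- ===== Notes on version B (the rewrite author's own statement) =====
-- stated objective: alternative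
-- what changed: Replaces the bisect binary-search parity test on the flattened boundary list with a direct linear scan that checks whether any boundary falls inside the island or an odd number of boundaries lies below it, and builds each chromosome's overlapped/nonoverlapped lists locally before inserting them once into the result dicts.
import Mathlib
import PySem

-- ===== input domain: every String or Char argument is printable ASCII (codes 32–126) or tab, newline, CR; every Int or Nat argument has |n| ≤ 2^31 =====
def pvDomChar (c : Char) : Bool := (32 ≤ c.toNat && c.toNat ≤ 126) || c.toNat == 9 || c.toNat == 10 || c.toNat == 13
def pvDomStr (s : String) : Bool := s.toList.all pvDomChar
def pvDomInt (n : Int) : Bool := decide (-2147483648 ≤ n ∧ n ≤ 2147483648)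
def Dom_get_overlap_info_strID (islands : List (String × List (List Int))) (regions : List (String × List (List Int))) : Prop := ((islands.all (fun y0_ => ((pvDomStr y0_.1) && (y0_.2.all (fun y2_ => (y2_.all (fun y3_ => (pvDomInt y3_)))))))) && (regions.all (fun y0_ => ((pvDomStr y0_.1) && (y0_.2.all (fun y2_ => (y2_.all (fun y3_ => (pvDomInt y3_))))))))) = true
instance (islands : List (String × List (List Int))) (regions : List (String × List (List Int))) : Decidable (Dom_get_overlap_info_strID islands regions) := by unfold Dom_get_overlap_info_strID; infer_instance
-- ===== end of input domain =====

-- B replaces A's bisect binary-search parity classification by a direct linear scan over the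
-- boundary list and builds each chromosome's two lists locally before one dict insertion each
-- (objective: alternative algorithm, same results).

-- ===== PORT A =====
-- dict membership / lookup on the association list (first match, per the type convention)
def pvFind (d : List (String × List (List Int))) (k : String) : Option (List (List Int)) :=
  (d.find? (fun p => p.1 == k)).map (·.2)

-- loop body of A's 'for chrom in islands' loop
def pvStepA (regions : List (String × List (List Int)))
    (st : PySem.Dict String (List (List Int)) × PySem.Dict String (List (List Int)))
    (ci : String × List (List Int)) :
    PySem.Dict String (List (List Int)) × PySem.Dict String (List (List Int)) :=
  match pvFind regions ci.1 with
  | none =>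
      -- 'if chrom not in nonoverlapped: … = []' then append = insert (current-or-[]) ++ [island]
      (st.1, ci.2.foldl (fun nv island => nv.insert ci.1 (nv.getD ci.1 [] ++ [island])) st.2)
  | some regs =>
      let regionlist : List Int := regs.foldl (fun acc region => acc ++ region) []
      -- the 'assert regionlist[num] < regionlist[num+1]' loop and 'assert island[0] <= island[1]'
      -- raise outside Pre_ and change no state; island[0]/island[1] port as pyGetD (in range on Pre_)
      ci.2.foldl (fun st2 island =>
        if PySem.List.bisectLeft regionlist (PySem.List.pyGetD island 0 0) ==
             PySem.List.bisectRight regionlist (PySem.List.pyGetD island 1 0) &&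
           PySem.List.bisectLeft regionlist (PySem.List.pyGetD island 0 0) % 2 == 0 then
          (st2.1, st2.2.insert ci.1 (st2.2.getD ci.1 [] ++ [island]))
        else
          (st2.1.insert ci.1 (st2.1.getD ci.1 [] ++ [island]), st2.2)) st

def get_overlap_info_strID (islands : List (String × List (List Int))) (regions : List (String × List (List Int))) : (List (String × List (List Int))) × (List (String × List (List Int))) :=
  let st := islands.foldl (pvStepA regions) (PySem.Dict.empty, PySem.Dict.empty)
  (st.1.items, st.2.items)

-- ===== PORT B =====
-- loop body of B's 'for chrom, isls in islands.items()' loop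
def pvStepB (regions : List (String × List (List Int)))
    (st : PySem.Dict String (List (List Int)) × PySem.Dict String (List (List Int)))
    (ci : String × List (List Int)) :
    PySem.Dict String (List (List Int)) × PySem.Dict String (List (List Int)) :=
  match pvFind regions ci.1 with
  | some regs =>
      let bounds : List Int := regs.flatMap (fun region => region)
      -- B's asserts raise outside Pre_ and change no state
      let p := ci.2.foldl (fun q island =>
          if (bounds.any fun x => decide (PySem.List.pyGetD island 0 0 ≤ x ∧ x ≤ PySem.List.pyGetD island 1 0)) ||
             bounds.countP (fun x => decide (x < PySem.List.pyGetD island 0 0)) % 2 == 1 then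
            (q.1 ++ [island], q.2)
          else
            (q.1, q.2 ++ [island])) (([] : List (List Int)), ([] : List (List Int)))
      ((if p.1.isEmpty then st.1 else st.1.insert ci.1 p.1),
       (if p.2.isEmpty then st.2 else st.2.insert ci.1 p.2))
  | none =>
      (st.1, if ci.2.isEmpty then st.2 else st.2.insert ci.1 ci.2)

def get_overlap_info_strID_alt (islands : List (String × List (List Int))) (regions : List (String × List (List Int))) : (List (String × List (List Int))) × (List (String × List (List Int))) :=
  let st := islands.foldl (pvStepB regions) (PySem.Dict.empty, PySem.Dict.empty)
  (st.1.items, st.2.items)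

-- ===== PRECONDITION & SPEC =====
-- Pre_ = exactly the inputs where Python A returns normally: for every chromosome present in
-- regions, its concatenated boundary list is strictly increasing (else AssertionError) and every
-- island there has at least two entries (else IndexError) with island[0] <= island[1] (else
-- AssertionError); island keys must be pairwise distinct, which every Python dict input satisfies.
def Pre_get_overlap_info_strID (islands : List (String × List (List Int))) (regions : List (String × List (List Int))) : Prop :=
  (islands.map Prod.fst).Nodup ∧
  ∀ ci ∈ islands,
    ((pvFind regions ci.1).all fun regs =>
      decide (List.Pairwise (fun x y => x < y) (regs.flatMap (fun region => region))) &&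
      ci.2.all (fun island =>
        decide (2 ≤ island.length) && decide (island.getD 0 0 ≤ island.getD 1 0))) = true
instance (islands : List (String × List (List Int))) (regions : List (String × List (List Int))) : Decidable (Pre_get_overlap_info_strID islands regions) := by unfold Pre_get_overlap_info_strID; infer_instance

def pvWitness_get_overlap_info_strID : (List (String × List (List Int))) × (List (String × List (List Int))) :=
  ([("chr1", [[1, 2], [10, 20]]), ("chr2", [[0, 4]])], [("chr1", [[0, 3], [5, 7]])])

def Spec_get_overlap_info_strID (islands : List (String × List (List Int))) (regions : List (String × List (List Int))) (out : (List (String × List (List Int))) × (List (String × List (List Int)))) : Prop := out = get_overlap_info_strID_alt islands regions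
instance (islands : List (String × List (List Int))) (regions : List (String × List (List Int))) (out : (List (String × List (List Int))) × (List (String × List (List Int)))) : Decidable (Spec_get_overlap_info_strID islands regions out) := by unfold Spec_get_overlap_info_strID; infer_instance

-- ===== CLAIM (what is proved, stated in full; the proofs are below) =====
def Claim_equal_get_overlap_info_strID : Prop := ∀ (islands : List (String × List (List Int))) (regions : List (String × List (List Int))), Dom_get_overlap_info_strID islands regions → Pre_get_overlap_info_strID islands regions → Spec_get_overlap_info_strID islands regions (get_overlap_info_strID islands regions)

-- ===== LEMMAS AND PROOFS =====

theorem pvWitness_ok :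
    Dom_get_overlap_info_strID pvWitness_get_overlap_info_strID.1 pvWitness_get_overlap_info_strID.2 ∧
    Pre_get_overlap_info_strID pvWitness_get_overlap_info_strID.1 pvWitness_get_overlap_info_strID.2 := by
  constructor <;> decide

-- what A's append-into-dict loop produces for one chromosome
def pvUpd (d : PySem.Dict String (List (List Int))) (k : String) (l : List (List Int)) :
    PySem.Dict String (List (List Int)) :=
  if l.isEmpty then d else d.insert k (d.getD k [] ++ l)

theorem pvUpd_insert_cons (d : PySem.Dict String (List (List Int))) (k : String)
    (x : List Int) (l : List (List Int)) :
    pvUpd (d.insert k (d.getD k [] ++ [x])) k l = pvUpd d k (x :: l) := by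
  unfold pvUpd
  cases l with
  | nil => simp
  | cons y t =>
      simp [PySem.Dict.getD_insert_self, PySem.Dict.insert_insert_self]

theorem pvUpd_of_not_contains (d : PySem.Dict String (List (List Int))) (k : String)
    (h : d.contains k = false) (l : List (List Int)) :
    pvUpd d k l = if l.isEmpty then d else d.insert k l := by
  unfold pvUpd
  rw [PySem.Dict.getD_of_not_contains d [] h]
  simp

-- A's none-branch loop
theorem pvFoldA_single (k : String) :
    ∀ (xs : List (List Int)) (d : PySem.Dict String (List (List Int))),
      xs.foldl (fun nv island => nv.insert k (nv.getD k [] ++ [island])) d = pvUpd d k xs := by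
  intro xs
  induction xs with
  | nil => intro d; simp [pvUpd]
  | cons x t ih =>
      intro d
      simp only [List.foldl_cons, ih, pvUpd_insert_cons]

-- A's classify loop, as the two filtered lists appended through pvUpd
theorem pvFoldA_pair (k : String) (C : List Int → Bool) :
    ∀ (xs : List (List Int)) (d1 d2 : PySem.Dict String (List (List Int))),
      xs.foldl (fun st2 island =>
          if C island then (st2.1, st2.2.insert k (st2.2.getD k [] ++ [island]))
          else (st2.1.insert k (st2.1.getD k [] ++ [island]), st2.2)) (d1, d2)
        = (pvUpd d1 k (xs.filter (fun i => !C i)), pvUpd d2 k (xs.filter C)) := by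
  intro xs
  induction xs with
  | nil => intro d1 d2; simp [pvUpd]
  | cons x t ih =>
      intro d1 d2
      cases hC : C x <;>
        simp [List.foldl_cons, hC, ih, pvUpd_insert_cons]

-- B's partition loop
theorem pvFoldB_pair (p : List Int → Bool) :
    ∀ (xs acc1 acc2 : List (List Int)),
      xs.foldl (fun q island => if p island then (q.1 ++ [island], q.2) else (q.1, q.2 ++ [island]))
          (acc1, acc2)
        = (acc1 ++ xs.filter p, acc2 ++ xs.filter (fun i => !p i)) := by
  intro xs
  induction xs with
  | nil => intro a1 a2; simp
  | cons x t ih =>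
      intro a1 a2
      by_cases hp : p x = true <;>
        simp [List.foldl_cons, hp, ih]

-- counting characterisation of a prefix property
theorem pvCountP_of_iff :
    ∀ (l : List Int) (p : Int → Bool) (s : Nat), s ≤ l.length →
      (∀ j (hj : j < l.length), (p l[j] = true ↔ j < s)) → l.countP p = s := by
  intro l
  induction l with
  | nil => intro p s hs _; simp at hs ⊢; omega
  | cons x t ih =>
      intro p s hs hiff
      have h0 := hiff 0 (by simp)
      simp only [List.length_cons] at hs
      cases s with
      | zero =>
          have hx : p x = false := by
            rcases hp : p x with _ | _
            · rfl
            · exact absurd (h0.mp (by simpa using hp)) (by omega)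
          have ht : List.countP p t = 0 := ih p 0 (by omega) (fun j hj => by
            have h1 := hiff (j + 1) (by simpa using Nat.succ_lt_succ hj)
            simpa using h1)
          rw [List.countP_cons, hx, ht]
          simp
      | succ s' =>
          have hx : p x = true := h0.mpr (Nat.succ_pos s')
          have ht : List.countP p t = s' := ih p s' (by omega) (fun j hj => by
            have h1 := hiff (j + 1) (by simpa using Nat.succ_lt_succ hj)
            simpa [Nat.succ_lt_succ_iff] using h1)
          rw [List.countP_cons, hx, ht]
          simp

theorem pvBisectLeft_eq (l : List Int) (a : Int)
    (hs : List.Pairwise (fun x y => x ≤ y) l) :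
    PySem.List.bisectLeft l a = l.countP (fun x => decide (x < a)) := by
  obtain ⟨hle, hlt, hge⟩ := PySem.List.bisectLeft_spec l a hs
  exact (pvCountP_of_iff l _ _ hle (fun j hj => by
    constructor
    · intro h
      by_contra hn
      have := hge j hj (by omega)
      simp at h
      omega
    · intro h
      simpa using hlt j hj h)).symm

theorem pvBisectRight_eq (l : List Int) (b : Int)
    (hs : List.Pairwise (fun x y => x ≤ y) l) :
    PySem.List.bisectRight l b = l.countP (fun x => decide (x ≤ b)) := by
  obtain ⟨hle, hlt, hge⟩ := PySem.List.bisectRight_spec l b hs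
  exact (pvCountP_of_iff l _ _ hle (fun j hj => by
    constructor
    · intro h
      by_contra hn
      have := hge j hj (by omega)
      simp at h
      omega
    · intro h
      simpa using hlt j hj h)).symm

theorem pvCountP_split (a b : Int) (hab : a ≤ b) :
    ∀ l : List Int,
      l.countP (fun x => decide (x ≤ b))
        = l.countP (fun x => decide (x < a)) + l.countP (fun x => decide (a ≤ x ∧ x ≤ b)) := by
  intro l
  induction l with
  | nil => simp
  | cons x t ih =>
      by_cases h1 : x < a <;> by_cases h2 : x ≤ b <;> by_cases h3 : a ≤ x <;>
        simp [h1, h2, h3, ih] <;> omega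

-- the per-island classification of A (bisect parity) and of B (linear scan) agree
theorem pvClassify_eq (bounds : List Int) (a b : Int)
    (hs : List.Pairwise (fun x y => x ≤ y) bounds) (hab : a ≤ b) :
    ((bounds.any fun x => decide (a ≤ x ∧ x ≤ b)) ||
        bounds.countP (fun x => decide (x < a)) % 2 == 1)
      = !(PySem.List.bisectLeft bounds a == PySem.List.bisectRight bounds b &&
          PySem.List.bisectLeft bounds a % 2 == 0) := by
  rw [Bool.eq_iff_iff]
  rw [pvBisectLeft_eq bounds a hs, pvBisectRight_eq bounds b hs,
    pvCountP_split a b hab bounds]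
  have hany : (bounds.any fun x => decide (a ≤ x ∧ x ≤ b)) = true
      ↔ 0 < bounds.countP (fun x => decide (a ≤ x ∧ x ≤ b)) := by
    rw [List.countP_pos_iff, List.any_eq_true]
  simp only [Bool.or_eq_true, Bool.not_eq_true', Bool.and_eq_false_iff, hany,
    beq_iff_eq, beq_eq_false_iff_ne, ne_eq]
  omega

-- the two loop bodies agree on fresh chromosomes satisfying Pre_'s per-chromosome condition
theorem pvStep_eq (regions : List (String × List (List Int))) (ci : String × List (List Int))
    (st : PySem.Dict String (List (List Int)) × PySem.Dict String (List (List Int)))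
    (hpre : ((pvFind regions ci.1).all fun regs =>
        decide (List.Pairwise (fun x y => x < y) (regs.flatMap (fun region => region))) &&
        ci.2.all (fun island =>
          decide (2 ≤ island.length) && decide (island.getD 0 0 ≤ island.getD 1 0))) = true)
    (h1 : st.1.contains ci.1 = false) (h2 : st.2.contains ci.1 = false) :
    pvStepA regions st ci = pvStepB regions st ci := by
  obtain ⟨d1, d2⟩ := st
  cases hf : pvFind regions ci.1 with
  | none =>
      simp only [pvStepA, pvStepB, hf]
      rw [pvFoldA_single ci.1 ci.2 d2, pvUpd_of_not_contains d2 ci.1 h2]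
  | some regs =>
      rw [hf] at hpre
      simp only [Option.all_some, Bool.and_eq_true, decide_eq_true_eq, List.all_eq_true] at hpre
      obtain ⟨hsortS, hisl⟩ := hpre
      simp only [pvStepA, pvStepB, hf]
      have hbl : regs.foldl (fun acc region => acc ++ region) ([] : List Int)
          = regs.flatMap (fun region => region) := by
        rw [PySem.List.foldl_append_eq_flatMap (fun region => region) regs []]
        rfl
      rw [hbl]
      rw [pvFoldA_pair ci.1
        (fun island =>
          PySem.List.bisectLeft (regs.flatMap (fun region => region)) (PySem.List.pyGetD island 0 0) ==
            PySem.List.bisectRight (regs.flatMap (fun region => region)) (PySem.List.pyGetD island 1 0) &&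
          PySem.List.bisectLeft (regs.flatMap (fun region => region)) (PySem.List.pyGetD island 0 0) % 2 == 0)
        ci.2 d1 d2]
      rw [pvFoldB_pair
        (fun island =>
          ((regs.flatMap (fun region => region)).any fun x =>
            decide (PySem.List.pyGetD island 0 0 ≤ x ∧ x ≤ PySem.List.pyGetD island 1 0)) ||
          (regs.flatMap (fun region => region)).countP
            (fun x => decide (x < PySem.List.pyGetD island 0 0)) % 2 == 1)
        ci.2 [] []]
      have hsorted : List.Pairwise (fun x y => x ≤ y) (regs.flatMap (fun region => region)) :=
        hsortS.imp (fun h => le_of_lt h)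
      have hpoint : ∀ island ∈ ci.2,
          (((regs.flatMap (fun region => region)).any fun x =>
              decide (PySem.List.pyGetD island 0 0 ≤ x ∧ x ≤ PySem.List.pyGetD island 1 0)) ||
            (regs.flatMap (fun region => region)).countP
              (fun x => decide (x < PySem.List.pyGetD island 0 0)) % 2 == 1)
          = !(PySem.List.bisectLeft (regs.flatMap (fun region => region)) (PySem.List.pyGetD island 0 0) ==
                PySem.List.bisectRight (regs.flatMap (fun region => region)) (PySem.List.pyGetD island 1 0) &&
              PySem.List.bisectLeft (regs.flatMap (fun region => region)) (PySem.List.pyGetD island 0 0) % 2 == 0) := by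
        intro island hmem
        obtain ⟨hlen, hab⟩ := hisl island hmem
        have ha : PySem.List.pyGetD island 0 0 = island.getD 0 0 := by
          rw [PySem.List.pyGetD_of_nonneg island 0 (by norm_num)]
          rfl
        have hb : PySem.List.pyGetD island 1 0 = island.getD 1 0 := by
          rw [PySem.List.pyGetD_of_nonneg island 0 (by norm_num)]
          rfl
        exact pvClassify_eq _ _ _ hsorted (by rw [ha, hb]; exact hab)
      have hf1 : ci.2.filter (fun island =>
            ((regs.flatMap (fun region => region)).any fun x =>
              decide (PySem.List.pyGetD island 0 0 ≤ x ∧ x ≤ PySem.List.pyGetD island 1 0)) ||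
            (regs.flatMap (fun region => region)).countP
              (fun x => decide (x < PySem.List.pyGetD island 0 0)) % 2 == 1)
          = ci.2.filter (fun island =>
            !(PySem.List.bisectLeft (regs.flatMap (fun region => region)) (PySem.List.pyGetD island 0 0) ==
                PySem.List.bisectRight (regs.flatMap (fun region => region)) (PySem.List.pyGetD island 1 0) &&
              PySem.List.bisectLeft (regs.flatMap (fun region => region)) (PySem.List.pyGetD island 0 0) % 2 == 0)) :=
        List.filter_congr hpoint
      have hf2 : ci.2.filter (fun island =>
            !(((regs.flatMap (fun region => region)).any fun x =>
              decide (PySem.List.pyGetD island 0 0 ≤ x ∧ x ≤ PySem.List.pyGetD island 1 0)) ||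
            (regs.flatMap (fun region => region)).countP
              (fun x => decide (x < PySem.List.pyGetD island 0 0)) % 2 == 1))
          = ci.2.filter (fun island =>
            PySem.List.bisectLeft (regs.flatMap (fun region => region)) (PySem.List.pyGetD island 0 0) ==
              PySem.List.bisectRight (regs.flatMap (fun region => region)) (PySem.List.pyGetD island 1 0) &&
            PySem.List.bisectLeft (regs.flatMap (fun region => region)) (PySem.List.pyGetD island 0 0) % 2 == 0) :=
        List.filter_congr (fun island hmem => by rw [hpoint island hmem]; simp)
      rw [pvUpd_of_not_contains d1 ci.1 h1, pvUpd_of_not_contains d2 ci.1 h2]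
      simp only [List.nil_append]
      rw [hf1, hf2]

theorem pvStepB_contains (regions : List (String × List (List Int)))
    (ci : String × List (List Int)) (k' : String) (hk : k' ≠ ci.1)
    (st : PySem.Dict String (List (List Int)) × PySem.Dict String (List (List Int))) :
    (pvStepB regions st ci).1.contains k' = st.1.contains k' ∧
    (pvStepB regions st ci).2.contains k' = st.2.contains k' := by
  obtain ⟨d1, d2⟩ := st
  cases hf : pvFind regions ci.1 with
  | none =>
      simp only [pvStepB, hf]
      constructor
      · trivial
      · split
        · rfl
        · simp [PySem.Dict.contains_insert, hk]
  | some regs =>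
      simp only [pvStepB, hf]
      constructor <;>
      · split
        · rfl
        · simp [PySem.Dict.contains_insert, hk]

theorem pvOuter (regions : List (String × List (List Int))) :
    ∀ (is : List (String × List (List Int)))
      (st : PySem.Dict String (List (List Int)) × PySem.Dict String (List (List Int))),
      (∀ ci ∈ is, ((pvFind regions ci.1).all fun regs =>
          decide (List.Pairwise (fun x y => x < y) (regs.flatMap (fun region => region))) &&
          ci.2.all (fun island =>
            decide (2 ≤ island.length) && decide (island.getD 0 0 ≤ island.getD 1 0))) = true) →
      (is.map Prod.fst).Nodup →
      (∀ ci ∈ is, st.1.contains ci.1 = false ∧ st.2.contains ci.1 = false) →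
      is.foldl (pvStepA regions) st = is.foldl (pvStepB regions) st := by
  intro is
  induction is with
  | nil => intro st _ _ _; rfl
  | cons ci t ih =>
      intro st hpre hnd hfresh
      have hstep := pvStep_eq regions ci st (hpre ci (by simp))
        (hfresh ci (by simp)).1 (hfresh ci (by simp)).2
      simp only [List.foldl_cons, hstep]
      apply ih
      · intro ci' h'; exact hpre ci' (by simp [h'])
      · simp only [List.map_cons, List.nodup_cons] at hnd; exact hnd.2
      · intro ci' h'
        have hne : ci'.1 ≠ ci.1 := by
          simp only [List.map_cons, List.nodup_cons] at hnd
          intro he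
          exact hnd.1 (he ▸ List.mem_map_of_mem h')
        have hc := pvStepB_contains regions ci ci'.1 hne st
        have := hfresh ci' (by simp [h'])
        exact ⟨hc.1.trans this.1, hc.2.trans this.2⟩

-- ===== VERDICT (by name: the statement is the Claim_ definition above) =====
theorem get_overlap_info_strID_spec : Claim_equal_get_overlap_info_strID := by
  intro islands regions _hdom hpre
  unfold Spec_get_overlap_info_strID get_overlap_info_strID get_overlap_info_strID_alt
  obtain ⟨hnd, hchrom⟩ := hpre
  rw [pvOuter regions islands (PySem.Dict.empty, PySem.Dict.empty) hchrom hnd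
    (fun ci _ => ⟨PySem.Dict.contains_empty ci.1, PySem.Dict.contains_empty ci.1⟩)]
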